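-- pv_equiv track=rewrite | github.com/henryliuser/hliu-cp | codeforces/L0/wet_shark_and_odd_and_even.py | solve
-- ===== SOURCE A (Python) =====
-- def solve(N, A):
--     ans = 0
--     xs = [[], []]
--     for x in A:
--         if x < 0: continue
--         xs[x%2] += [x]
--
--     xs[0].sort(), xs[1].sort()
--     j = len(xs[1]) % 2
--
--     a = sum(xs[0])
--     b = sum(xs[1][j:])
--     return a + b
-- ===== SOURCE B (Python) =====
-- def solve(N, A):
--     total = 0
--     parity = 0
--     min_odd = None
--     for x in A:
--         if x < 0:
--             continue
--         total += x
--         if x % 2 == 1: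
--             parity ^= 1
--             if min_odd is None or x < min_odd:
--                 min_odd = x
--     return total - min_odd if parity else total
-- ===== Notes on version B (the rewrite author's own statement) =====
-- stated objective: faster
-- what changed: B replaces A's bucket-building plus two sorts and a slice by a single pass over A that maintains three accumulators (running total of non-negatives, a parity toggle for odds, and the running minimum odd), subtracting the tracked minimum at the end when the parity bit is set.
import Mathlib
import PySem

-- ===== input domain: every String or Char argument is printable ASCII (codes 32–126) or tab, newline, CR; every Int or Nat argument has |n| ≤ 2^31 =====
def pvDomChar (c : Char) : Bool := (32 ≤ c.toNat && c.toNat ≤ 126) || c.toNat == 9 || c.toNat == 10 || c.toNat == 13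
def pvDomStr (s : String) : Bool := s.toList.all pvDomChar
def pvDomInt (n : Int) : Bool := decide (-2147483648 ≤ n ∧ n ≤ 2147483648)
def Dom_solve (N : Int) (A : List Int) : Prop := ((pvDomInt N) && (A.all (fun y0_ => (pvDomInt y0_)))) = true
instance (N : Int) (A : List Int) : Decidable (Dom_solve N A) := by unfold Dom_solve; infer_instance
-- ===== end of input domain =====

-- B replaces A's bucket lists, two sorts and slice by ONE pass keeping a running total,
-- a parity toggle and the running minimum odd; a timing run measures the speed claim.

-- ===== PORT A =====
def solve (N : Int) (A : List Int) : Int :=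
  let xs := A.foldl (fun (p : List Int × List Int) x =>
    if x < 0 then p
    else if PySem.Int.mod x 2 == 1 then (p.1, p.2 ++ [x]) else (p.1 ++ [x], p.2))
    ([], [])
  let xs0 := PySem.List.sorted xs.1 (fun y => y) false
  let xs1 := PySem.List.sorted xs.2 (fun y => y) false
  let j := PySem.Int.mod (xs1.length : Int) 2
  let a := xs0.sum
  let b := (PySem.List.slice xs1 (some j) none).sum
  a + b

-- ===== PORT B =====
-- running minimum update: 'if min_odd is None or x < min_odd: min_odd = x'
def bmin (s : Option Int) (x : Int) : Option Int :=
  match s with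
  | none => some x
  | some m => if x < m then some x else some m

def solve_alt (N : Int) (A : List Int) : Int :=
  let st := A.foldl (fun (s : Int × Bool × Option Int) x =>
    if x < 0 then s
    else if PySem.Int.mod x 2 == 1 then (s.1 + x, !s.2.1, bmin s.2.2 x)
    else (s.1 + x, s.2.1, s.2.2)) (0, false, none)
  if st.2.1 then
    match st.2.2 with
    | some m => st.1 - m
    | none => st.1          -- unreachable: parity set implies an odd was seen
  else st.1

-- ===== PRECONDITION & SPEC =====
def Spec_solve (N : Int) (A : List Int) (out : Int) : Prop := out = solve_alt N A
instance (N : Int) (A : List Int) (out : Int) : Decidable (Spec_solve N A out) := by unfold Spec_solve; infer_instance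

-- ===== CLAIM (what is proved, stated in full; the proofs are below) =====
def Claim_equal_solve : Prop := ∀ (N : Int) (A : List Int), Dom_solve N A → Spec_solve N A (solve N A)

-- ===== LEMMAS AND PROOFS =====

-- A's bucket fold is the two parity filters
theorem solve_fold_filters (A : List Int) (e o : List Int) :
    A.foldl (fun (p : List Int × List Int) x =>
      if x < 0 then p
      else if PySem.Int.mod x 2 == 1 then (p.1, p.2 ++ [x]) else (p.1 ++ [x], p.2))
      (e, o)
    = (e ++ A.filter (fun x => 0 ≤ x && PySem.Int.mod x 2 == 0),
       o ++ A.filter (fun x => 0 ≤ x && PySem.Int.mod x 2 == 1)) := by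
  induction A generalizing e o with
  | nil => simp
  | cons x t ih =>
    simp only [List.foldl_cons, List.filter_cons]
    by_cases hx : x < 0
    · rw [if_pos hx, ih]
      have h0 : decide (0 ≤ x) = false := by simp; omega
      simp [h0]
    · rw [if_neg hx]
      have h0 : (0:Int) ≤ x := by omega
      by_cases h1 : PySem.Int.mod x 2 == 1
      · rw [if_pos h1, ih]
        have hm : PySem.Int.mod x 2 = 1 := by simpa using h1
        have hem : x % 2 = 1 := (PySem.Int.mod_eq_emod_of_pos (by norm_num)).symm.trans hm
        simp [h0, hem]
      · rw [if_neg h1, ih]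
        have hnn := PySem.Int.mod_nonneg (a := x) (b := 2) (by norm_num)
        have hlt := PySem.Int.mod_lt (a := x) (b := 2) (by norm_num)
        have hm : PySem.Int.mod x 2 = 0 := by
          simp only [beq_iff_eq] at h1; omega
        have hem : x % 2 = 0 := (PySem.Int.mod_eq_emod_of_pos (by norm_num)).symm.trans hm
        simp [h0, hem]

-- B's one-pass fold, characterised by the same two filters
theorem solve_alt_fold (A : List Int) (t : Int) (p : Bool) (m : Option Int) :
    A.foldl (fun (s : Int × Bool × Option Int) x =>
      if x < 0 then s
      else if PySem.Int.mod x 2 == 1 then (s.1 + x, !s.2.1, bmin s.2.2 x)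
      else (s.1 + x, s.2.1, s.2.2)) (t, p, m)
    = (t + (A.filter (fun x => 0 ≤ x && PySem.Int.mod x 2 == 0)).sum
         + (A.filter (fun x => 0 ≤ x && PySem.Int.mod x 2 == 1)).sum,
       p.xor (decide ((A.filter (fun x => 0 ≤ x && PySem.Int.mod x 2 == 1)).length % 2 = 1)),
       (A.filter (fun x => 0 ≤ x && PySem.Int.mod x 2 == 1)).foldl bmin m) := by
  induction A generalizing t p m with
  | nil => simp
  | cons x tl ih =>
    simp only [List.foldl_cons, List.filter_cons]
    by_cases hx : x < 0
    · rw [if_pos hx, ih]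
      have h0 : decide (0 ≤ x) = false := by simp; omega
      simp [h0]
    · rw [if_neg hx]
      have h0 : (0:Int) ≤ x := by omega
      by_cases h1 : PySem.Int.mod x 2 == 1
      · rw [if_pos h1, ih]
        have hm : PySem.Int.mod x 2 = 1 := by simpa using h1
        have hpar : ∀ n : Nat, (!p).xor (decide (n % 2 = 1))
            = p.xor (decide ((n + 1) % 2 = 1)) := by
          intro n
          by_cases hn : n % 2 = 1
          · have : (n + 1) % 2 = 0 := by omega
            simp [hn, this]
          · have : (n + 1) % 2 = 1 := by omega
            simp [hn, this]
        simp only [h0, hm, decide_true, Bool.true_and, beq_self_eq_true, if_true,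
          show ((1:Int) == 0) = false from rfl, Bool.false_eq_true, if_false,
          List.length_cons, List.sum_cons, List.foldl_cons, Prod.mk.injEq]
        rw [hpar]
        exact ⟨by ring, rfl, trivial⟩
      · rw [if_neg h1, ih]
        have hnn := PySem.Int.mod_nonneg (a := x) (b := 2) (by norm_num)
        have hlt := PySem.Int.mod_lt (a := x) (b := 2) (by norm_num)
        have hm : PySem.Int.mod x 2 = 0 := by
          simp only [beq_iff_eq] at h1; omega
        simp only [h0, hm, decide_true, Bool.true_and, show ((0:Int) == 1) = false from rfl,
          Bool.false_eq_true, if_false, beq_self_eq_true, if_true, List.sum_cons, Prod.mk.injEq]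
        exact ⟨by ring, trivial⟩

-- the running minimum over a nonempty list: it is a member and a lower bound
theorem bmin_fold_spec (l : List Int) (m0 : Int) :
    ∃ mn, l.foldl bmin (some m0) = some mn ∧ (mn = m0 ∨ mn ∈ l) ∧ mn ≤ m0 ∧ ∀ y ∈ l, mn ≤ y := by
  induction l generalizing m0 with
  | nil => exact ⟨m0, rfl, Or.inl rfl, le_refl _, by simp⟩
  | cons x t ih =>
    simp only [List.foldl_cons, bmin]
    by_cases hx : x < m0
    · rw [if_pos hx]
      obtain ⟨mn, h1, h2, h3, h4⟩ := ih x
      refine ⟨mn, h1, ?_, by omega, ?_⟩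
      · rcases h2 with h | h
        · exact Or.inr (by simp [h])
        · exact Or.inr (List.mem_cons_of_mem _ h)
      · intro y hy
        rcases List.mem_cons.mp hy with h | h
        · omega
        · exact h4 y h
    · rw [if_neg hx]
      obtain ⟨mn, h1, h2, h3, h4⟩ := ih m0
      refine ⟨mn, h1, ?_, h3, ?_⟩
      · rcases h2 with h | h
        · exact Or.inl h
        · exact Or.inr (List.mem_cons_of_mem _ h)
      · intro y hy
        rcases List.mem_cons.mp hy with h | h
        · omega
        · exact h4 y h

-- ===== VERDICT =====
theorem solve_spec : Claim_equal_solve := by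
  intro N A _
  unfold Spec_solve solve solve_alt
  rw [solve_fold_filters, solve_alt_fold]
  simp only [List.nil_append]
  set ev := A.filter (fun x => 0 ≤ x && PySem.Int.mod x 2 == 0) with hev
  set od := A.filter (fun x => 0 ≤ x && PySem.Int.mod x 2 == 1) with hod
  have hperm0 := PySem.List.sorted_perm ev (fun y : Int => y) false
  have hperm1 := PySem.List.sorted_perm od (fun y : Int => y) false
  have hlen : (PySem.List.sorted od (fun y : Int => y) false).length = od.length :=
    hperm1.length_eq
  have hsum0 : (PySem.List.sorted ev (fun y : Int => y) false).sum = ev.sum :=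
    hperm0.sum_eq
  have hsum1 : (PySem.List.sorted od (fun y : Int => y) false).sum = od.sum :=
    hperm1.sum_eq
  rw [hlen]
  by_cases hpar : od.length % 2 = 1
  · -- odd number of odds
    have hm1 : PySem.Int.mod (od.length : Int) 2 = 1 := by
      rw [PySem.Int.mod_eq_emod_of_pos (by norm_num)]
      omega
    have hne : od ≠ [] := by
      intro h; rw [h] at hpar; simp at hpar
    obtain ⟨x, tl, hxtl⟩ := List.exists_cons_of_ne_nil hne
    -- B's min accumulator
    have hb : od.foldl bmin none = od.foldl bmin none := rfl
    rw [hxtl] at hb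
    obtain ⟨mn, hmn, hmem, hx3, hlb⟩ := bmin_fold_spec tl x
    have hmn' : od.foldl bmin (none : Option Int) = some mn := by
      rw [hxtl]; simpa [bmin] using hmn
    have hmnmem : mn ∈ od := by
      rw [hxtl]
      rcases hmem with h | h
      · simp [h]
      · exact List.mem_cons_of_mem _ h
    have hmnlb : ∀ y ∈ od, mn ≤ y := by
      intro y hy
      rw [hxtl] at hy
      rcases List.mem_cons.mp hy with h | h
      · subst h; exact hx3
      · exact hlb y h
    -- A's sorted head
    obtain ⟨m, t, hcons⟩ : ∃ m t, PySem.List.sorted od (fun y : Int => y) false = m :: t := by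
      cases hs : PySem.List.sorted od (fun y : Int => y) false with
      | nil => exact absurd ((PySem.List.sorted_eq_nil_iff od (fun y : Int => y) false).mp hs) hne
      | cons m t => exact ⟨m, t, rfl⟩
    rw [hcons, hm1, PySem.List.slice_from_one]
    have hmmem : m ∈ od := hperm1.mem_iff.mp (by rw [hcons]; simp)
    have h1 : m ≤ mn := PySem.List.key_head_sorted_le od (fun y : Int => y) hcons mn hmnmem
    have h2 : mn ≤ m := hmnlb m hmmem
    have hsum : m + t.sum = od.sum := by
      have : (m :: t).sum = od.sum := by rw [← hcons]; exact hsum1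
      simpa using this
    simp only [hpar, decide_true, Bool.false_xor, if_true, hmn',
      List.tail_cons]
    omega
  · -- even number of odds
    have hm0 : PySem.Int.mod (od.length : Int) 2 = 0 := by
      rw [PySem.Int.mod_eq_emod_of_pos (by norm_num)]
      omega
    simp only [hpar, decide_false, Bool.xor_false, Bool.false_eq_true, if_false]
    rw [hm0, PySem.List.slice_zero_start, PySem.List.slice_none_none, hsum0, hsum1]
    ring
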